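-- pv_equiv track=rewrite | github.com/jeongho1209/CodingTest-python | 프로그래머스/unrated/181931. 등차수열의 특정한 항만 더하기/등차수열의 특정한 항만 더하기.py | solution
-- ===== SOURCE A (Python) =====
-- def solution(a, d, included):
--     trueIndex = []
--
--     answer = 0
--
--     for i in range(len(included)):
--         if included[i] == True:
--             trueIndex.append(i)
--
--     for i in trueIndex:
--         answer += a + d * i
--
--     return answer
-- ===== SOURCE B (Python) =====
-- def solution(a, d, included):
--     count = 0
--     idx_sum = 0
--     for i, x in enumerate(included):
--         if x == True:
--             count += 1
--             idx_sum += i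
--     return a * count + d * idx_sum
-- ===== Notes on version B (the rewrite author's own statement) =====
-- stated objective: simpler
-- what changed: One enumerate pass keeps only a count and an index-sum aggregate and returns the closed form a*count + d*idx_sum, instead of building an intermediate index list and re-adding a + d*i per term in a second loop.
import Mathlib
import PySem

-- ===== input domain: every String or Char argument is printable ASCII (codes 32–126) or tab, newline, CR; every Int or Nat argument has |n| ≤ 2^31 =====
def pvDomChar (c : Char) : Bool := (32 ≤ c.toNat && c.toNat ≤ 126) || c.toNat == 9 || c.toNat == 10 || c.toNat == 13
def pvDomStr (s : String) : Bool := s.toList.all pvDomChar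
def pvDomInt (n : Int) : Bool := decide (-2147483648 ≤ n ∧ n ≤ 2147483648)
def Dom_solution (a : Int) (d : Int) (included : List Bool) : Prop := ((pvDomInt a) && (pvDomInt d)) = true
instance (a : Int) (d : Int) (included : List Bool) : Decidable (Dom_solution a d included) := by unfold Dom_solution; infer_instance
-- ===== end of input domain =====

-- B replaces A's intermediate index list + second summing loop by one enumerate pass keeping a
-- count and an index-sum, returning the closed form a*count + d*idx_sum (objective: simpler).

-- ===== PORT A =====
def solution (a : Int) (d : Int) (included : List Bool) : Int :=
  let trueIndex : List Int :=
    (PySem.List.pyRange 0 included.length 1).foldl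
      (fun ti i => if PySem.List.pyGetD included i false == true then ti ++ [i] else ti) []
  trueIndex.foldl (fun answer i => answer + (a + d * i)) 0

-- ===== PORT B =====
def solution_alt (a : Int) (d : Int) (included : List Bool) : Int :=
  let p :=
    (PySem.List.enumerate included 0).foldl
      (fun (p : Int × Int) ix => if ix.2 == true then (p.1 + 1, p.2 + ix.1) else p) (0, 0)
  a * p.1 + d * p.2

-- ===== PRECONDITION & SPEC =====
def Spec_solution (a : Int) (d : Int) (included : List Bool) (out : Int) : Prop := out = solution_alt a d included
instance (a : Int) (d : Int) (included : List Bool) (out : Int) : Decidable (Spec_solution a d included out) := by unfold Spec_solution; infer_instance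

-- ===== CLAIM (what is proved, stated in full; the proofs are below) =====
def Claim_equal_solution : Prop := ∀ (a : Int) (d : Int) (included : List Bool), Dom_solution a d included → Spec_solution a d included (solution a d included)

-- ===== LEMMAS AND PROOFS =====

theorem sum_loop (a d : Int) (ti : List Int) (init : Int) :
    ti.foldl (fun answer i => answer + (a + d * i)) init
      = init + a * ti.length + d * ti.sum := by
  induction ti generalizing init with
  | nil => simp
  | cons x xs ih => simp [List.foldl, ih]; ring

theorem build_loop (g : Int → Bool) (L : List Int) (acc : List Int) :
    L.foldl (fun ti i => if g i then ti ++ [i] else ti) acc = acc ++ L.filter g := by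
  induction L generalizing acc with
  | nil => simp
  | cons x xs ih => by_cases h : g x <;> simp [List.foldl, h, ih]

theorem pair_loop (g : Int → Bool) (L : List Int) (c s : Int) :
    L.foldl (fun (p : Int × Int) j => if g j then (p.1 + 1, p.2 + j) else p) (c, s)
      = (c + (L.filter g).length, s + (L.filter g).sum) := by
  induction L generalizing c s with
  | nil => simp
  | cons x xs ih =>
    by_cases h : g x <;> simp [List.foldl, h, ih] <;> constructor <;> ring

-- ===== VERDICT (by name: the statement is the Claim_ definition above) =====
theorem solution_spec : Claim_equal_solution := by
  intro a d included _
  show solution a d included = solution_alt a d included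
  unfold solution solution_alt
  rw [PySem.List.enumerate_eq_map_pyRange included false, List.foldl_map]
  simp only [build_loop, pair_loop, sum_loop, List.nil_append, PySem.List.len]
  ring
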